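-- pv_equiv track=rewrite | github.com/thisishwan2/Algorithm | programmers/PCCP/석유 시추.py | solution
-- ===== SOURCE A (Python) =====
-- from collections import deque
-- from collections import deque
-- from collections import deque
-- from collections import deque
--
-- dx = [-1, 1, 0, 0]
--
-- dy = [0, 0, -1, 1]
--
-- def bfs(x, y, land, visited, idx):
--     q = deque()
--     q.append([x, y])
--     visited[x][y] = idx
--     cnt = 1
--
--     while q:
--         x, y = q.popleft()
--         for i in range(4):
--             nx = x + dx[i]
--             ny = y + dy[i]
--
--             if 0 <= nx < len(land) and 0 <= ny < len(land[0]):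
--                 if visited[nx][ny] == 0 and land[nx][ny] == 1:
--                     q.append([nx, ny])
--                     visited[nx][ny] = idx
--                     cnt += 1
--     return cnt
--
-- def solution(land):
--     answer = 0
--
--     visited = [[0 for _ in range(len(land[0]))] for _ in range(len(land))]
--     arr = []
--     dic = {}
--     idx = 1
--
--     for j in range(len(land[0])):
--         tmp = 0
--         dic_tmp = list(dic.keys())
--         for i in range(len(land)):
--             if land[i][j] == 1:
--                 if visited[i][j] == 0:
--                     cnt = bfs(i, j, land, visited, idx)
--                     tmp += cnt
--                     dic[idx] = cnt
--                     idx += 1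
--
--                 elif visited[i][j] in dic_tmp:
--                     tmp += dic.get(visited[i][j])
--                     dic_tmp.remove(visited[i][j])
--         arr.append(tmp)
--
--     return max(arr)
-- ===== SOURCE B (Python) =====
-- from collections import deque
--
-- dx = [-1, 1, 0, 0]
--
-- dy = [0, 0, -1, 1]
--
-- def bfs(x, y, land, visited, idx):
--     q = deque()
--     q.append([x, y])
--     visited[x][y] = idx
--     cnt = 1
--
--     while q:
--         x, y = q.popleft()
--         for i in range(4):
--             nx = x + dx[i]
--             ny = y + dy[i]
--
--             if 0 <= nx < len(land) and 0 <= ny < len(land[0]):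
--                 if visited[nx][ny] == 0 and land[nx][ny] == 1:
--                     q.append([nx, ny])
--                     visited[nx][ny] = idx
--                     cnt += 1
--     return cnt
--
-- def solution(land):
--     rows, cols = len(land), len(land[0])
--     visited = [[0] * cols for _ in range(rows)]
--     sizes = [0]  # sizes[l] = size of the component labelled l (labels start at 1)
--     for j in range(cols):
--         for i in range(rows):
--             if land[i][j] == 1 and visited[i][j] == 0:
--                 sizes.append(bfs(i, j, land, visited, len(sizes)))
--     column_totals = []
--     for j in range(cols):
--         labels = {visited[i][j] for i in range(rows)}
--         labels.discard(0)
--         column_totals.append(sum(sizes[l] for l in labels))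
--     return max(column_totals)
-- ===== Notes on version B (the rewrite author's own statement) =====
-- stated objective: alternative
-- what changed: B labels all components in one pass and then computes each column's total directly from the final label matrix (distinct labels per column, sizes summed), replacing A's per-column dict-keys snapshot with linear-scan membership tests and removals interleaved with the flood fill.
-- outside the precondition, e.g. on solution([]): A raises IndexError, B raises IndexError; on solution([[]]): A raises ValueError, B raises ValueError; on solution([[1, 1], [1]]): A raises IndexError, B raises IndexError
import Mathlib
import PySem

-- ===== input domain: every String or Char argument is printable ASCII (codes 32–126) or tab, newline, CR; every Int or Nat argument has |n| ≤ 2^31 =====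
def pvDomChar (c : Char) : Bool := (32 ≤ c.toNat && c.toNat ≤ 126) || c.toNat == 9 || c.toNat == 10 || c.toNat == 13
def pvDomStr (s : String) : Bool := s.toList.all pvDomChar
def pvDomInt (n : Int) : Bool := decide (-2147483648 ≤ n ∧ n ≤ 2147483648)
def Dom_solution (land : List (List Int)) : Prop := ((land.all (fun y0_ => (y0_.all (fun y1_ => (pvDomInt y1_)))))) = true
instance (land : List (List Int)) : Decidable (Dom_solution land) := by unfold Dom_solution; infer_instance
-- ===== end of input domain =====

-- B replaces A's per-column dict-snapshot/remove bookkeeping by labelling once and summing the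
-- distinct component labels of each column over the final label matrix (objective: alternative).
-- A mutates nothing observable to the caller except its own locals; both programs leave `land` intact.

-- ===== PORT A =====
-- module constants dx, dy
def dxL : List Int := [-1, 1, 0, 0]
def dyL : List Int := [0, 0, -1, 1]

-- visited[x][y] read / write; every use is guarded in range (0 ≤ i < len), so getD/toNat is exact
def vget (V : List (List Int)) (i j : Int) : Int := (V.getD i.toNat []).getD j.toNat 0
def vset (V : List (List Int)) (i j : Int) (v : Int) : List (List Int) :=
  V.set i.toNat ((V.getD i.toNat []).set j.toNat v)

-- body of `for i in range(4)` inside bfs's while loop; state = (queue, visited, cnt)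
def bfsStep (land : List (List Int)) (x y idx : Int)
    (s : List (Int × Int) × List (List Int) × Int) (i : Int) :
    List (Int × Int) × List (List Int) × Int :=
  let nx := x + dxL.getD i.toNat 0
  let ny := y + dyL.getD i.toNat 0
  if 0 ≤ nx ∧ nx < (land.length : Int) ∧ 0 ≤ ny ∧ ny < ((land.headD []).length : Int) then
    if vget s.2.1 nx ny = 0 ∧ vget land nx ny = 1 then
      (s.1 ++ [(nx, ny)], vset s.2.1 nx ny idx, s.2.2 + 1)
    else s
  else s

-- `while q:` — fuel-based; each iteration pops one element and the total number of enqueues is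
-- at most 1 + rows*cols (every enqueue first flips a 0 cell to idx ≠ 0), so the fuel chosen by
-- `bfs` below is never exhausted on the calls both ports make
def bfsLoop (land : List (List Int)) (idx : Int) : Nat → List (Int × Int) →
    List (List Int) → Int → List (List Int) × Int
  | 0, _, V, cnt => (V, cnt)
  | _ + 1, [], V, cnt => (V, cnt)
  | f + 1, (x, y) :: qs, V, cnt =>
      let s := (PySem.List.pyRange 0 4 1).foldl (bfsStep land x y idx) (qs, V, cnt)
      bfsLoop land idx f s.1 s.2.1 s.2.2

def bfs (x y : Int) (land V : List (List Int)) (idx : Int) : List (List Int) × Int :=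
  bfsLoop land idx (land.length * (land.headD []).length + 2) [(x, y)] (vset V x y idx) 1

structure AInner where
  V : List (List Int)
  dic : PySem.Dict Int Int
  idx : Int
  tmp : Int
  dicTmp : List Int
deriving Repr

structure AState where
  V : List (List Int)
  dic : PySem.Dict Int Int
  idx : Int
  arr : List Int
deriving Repr

-- body of `for i in range(len(land))`
def aRow (land : List (List Int)) (j : Int) (s : AInner) (i : Int) : AInner :=
  if vget land i j = 1 then
    if vget s.V i j = 0 then
      let r := bfs i j land s.V s.idx
      { V := r.1, dic := s.dic.insert s.idx r.2, idx := s.idx + 1,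
        tmp := s.tmp + r.2, dicTmp := s.dicTmp }
    else if s.dicTmp.contains (vget s.V i j) then
      -- dic.get / list.remove cannot fail here: the key was just found in dic_tmp ⊆ dic.keys
      { s with tmp := s.tmp + (s.dic.get? (vget s.V i j)).getD 0,
               dicTmp := (PySem.List.remove? s.dicTmp (vget s.V i j)).getD s.dicTmp }
    else s
  else s

-- body of `for j in range(len(land[0]))`
def aCol (land : List (List Int)) (rows : Nat) (s : AState) (j : Int) : AState :=
  let r := (PySem.List.pyRange 0 (rows : Int) 1).foldl (aRow land j)
      { V := s.V, dic := s.dic, idx := s.idx, tmp := 0, dicTmp := s.dic.keys }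
  { V := r.V, dic := r.dic, idx := r.idx, arr := s.arr ++ [r.tmp] }

def solution (land : List (List Int)) : Int :=
  let rows := land.length
  let cols := (land.headD []).length
  let init : AState :=
    { V := List.replicate rows (List.replicate cols 0), dic := PySem.Dict.empty,
      idx := 1, arr := [] }
  let fin := (PySem.List.pyRange 0 (cols : Int) 1).foldl (aCol land rows) init
  (PySem.List.max? fin.arr (fun x => x)).getD 0  -- max(arr); arr ≠ [] under Pre_

-- ===== PORT B =====
structure BLabel where
  V : List (List Int)
  sizes : List Int
deriving Repr

-- labelling pass: body of the inner `for i in range(rows)`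
def bCell (land : List (List Int)) (j : Int) (s : BLabel) (i : Int) : BLabel :=
  if vget land i j = 1 ∧ vget s.V i j = 0 then
    let r := bfs i j land s.V (s.sizes.length : Int)
    { V := r.1, sizes := s.sizes ++ [r.2] }
  else s

def bCol (land : List (List Int)) (rows : Nat) (s : BLabel) (j : Int) : BLabel :=
  (PySem.List.pyRange 0 (rows : Int) 1).foldl (bCell land j) s

-- one column's total: the set of labels in the column, 0 discarded, sizes summed
-- (the sum over a Python set is order-insensitive: Int addition commutes)
def colTotal (rows : Nat) (V : List (List Int)) (sizes : List Int) (j : Int) : Int :=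
  let labels : PySem.Set Int :=
    (PySem.List.pyRange 0 (rows : Int) 1).foldl
      (fun s i => PySem.Set.add s (vget V i j)) PySem.Set.empty
  ((PySem.Set.discard labels 0).map (fun l => sizes.getD l.toNat 0)).sum

def solution_alt (land : List (List Int)) : Int :=
  let rows := land.length
  let cols := (land.headD []).length
  let init : BLabel := { V := List.replicate rows (List.replicate cols 0), sizes := [0] }
  let lab := (PySem.List.pyRange 0 (cols : Int) 1).foldl (bCol land rows) init
  let totals := (PySem.List.pyRange 0 (cols : Int) 1).foldl
      (fun acc j => acc ++ [colTotal rows lab.V lab.sizes j]) ([] : List Int)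
  (PySem.List.max? totals (fun x => x)).getD 0

-- ===== PRECONDITION & SPEC =====
-- Pre_ excludes exactly the inputs on which A raises: an empty grid (IndexError on land[0]),
-- a first row of length 0 (max([]) ValueError), and a row shorter than the first row
-- (IndexError while scanning that column).
def Pre_solution (land : List (List Int)) : Prop :=
  land ≠ [] ∧ (land.headD []).length ≠ 0 ∧
    ∀ row ∈ land, (land.headD []).length ≤ row.length
instance (land : List (List Int)) : Decidable (Pre_solution land) := by
  unfold Pre_solution; infer_instance

def pvWitness_solution : List (List Int) := [[1, 0], [1, 1]]

def Spec_solution (land : List (List Int)) (out : Int) : Prop := out = solution_alt land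
instance (land : List (List Int)) (out : Int) : Decidable (Spec_solution land out) := by
  unfold Spec_solution; infer_instance

-- ===== CLAIM (what is proved, stated in full; the proofs are below) =====
def Claim_equal_solution : Prop :=
  ∀ (land : List (List Int)), Dom_solution land → Pre_solution land →
    Spec_solution land (solution land)

-- ===== LEMMAS AND PROOFS =====
-- matrix getter in Nat coordinates; vget/vset agree with it on cast indices
def g (V : List (List Int)) (i j : Nat) : Int := (V.getD i []).getD j 0

theorem vget_natCast (V : List (List Int)) (i j : Nat) : vget V ↑i ↑j = g V i j := by
  simp [vget, g]

theorem vset_natCast (V : List (List Int)) (i j : Nat) (v : Int) :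
    vset V ↑i ↑j v = V.set i ((V.getD i []).set j v) := by
  simp [vset]

theorem getD_set {α : Type} (l : List α) (n m : Nat) (a : α) (d : α) :
    (l.set n a).getD m d = if n = m ∧ n < l.length then a else l.getD m d := by
  by_cases h1 : n = m
  · subst h1
    by_cases h2 : n < l.length
    · rw [List.getD_eq_getElem?_getD, List.getElem?_set_self h2]
      simp [h2]
    · rw [List.set_eq_of_length_le (by omega)]
      simp [h2]
  · rw [List.getD_eq_getElem?_getD, List.getElem?_set_ne h1, ← List.getD_eq_getElem?_getD]
    simp [h1]

def Shaped (r c : Nat) (V : List (List Int)) : Prop :=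
  V.length = r ∧ ∀ row ∈ V, row.length = c

theorem shaped_replicate (r c : Nat) :
    Shaped r c (List.replicate r (List.replicate c (0 : Int))) := by
  constructor
  · simp
  · intro row hrow
    rw [List.eq_of_mem_replicate hrow]; simp

theorem g_replicate (r c i j : Nat) :
    g (List.replicate r (List.replicate c (0 : Int))) i j = 0 := by
  simp only [g, List.getD_eq_getElem?_getD, List.getElem?_replicate]
  split_ifs <;> simp

theorem shaped_set {r c : Nat} {V : List (List Int)} (h : Shaped r c V) (i j : Nat) (v : Int)
    (hi : i < r) : Shaped r c (V.set i ((V.getD i []).set j v)) := by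
  obtain ⟨h1, h2⟩ := h
  refine ⟨by simpa using h1, ?_⟩
  intro row hrow
  rcases List.mem_or_eq_of_mem_set hrow with hmem | heq
  · exact h2 _ hmem
  · subst heq
    rw [List.length_set, List.getD_eq_getElem?_getD, List.getElem?_eq_getElem (by omega)]
    exact h2 _ (List.getElem_mem _)

theorem g_set_self {r c : Nat} {V : List (List Int)} (h : Shaped r c V) {i j : Nat}
    (hi : i < r) (hj : j < c) (v : Int) :
    g (V.set i ((V.getD i []).set j v)) i j = v := by
  obtain ⟨h1, h2⟩ := h
  unfold g
  have hrow : (V.getD i []).length = c := by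
    rw [List.getD_eq_getElem?_getD, List.getElem?_eq_getElem (by omega)]
    exact h2 _ (List.getElem_mem _)
  rw [getD_set, if_pos ⟨rfl, by omega⟩, getD_set, if_pos ⟨rfl, by omega⟩]

theorem g_set_ne (V : List (List Int)) (a b : Nat) (v : Int) (i j : Nat)
    (h : ¬(a = i ∧ b = j)) :
    g (V.set a ((V.getD a []).set b v)) i j = g V i j := by
  unfold g
  rw [getD_set]
  by_cases hai : a = i ∧ a < V.length
  · obtain ⟨rfl, hlen⟩ := hai
    rw [if_pos ⟨rfl, hlen⟩, getD_set]
    rw [if_neg (by intro hh; exact h ⟨rfl, hh.1⟩)]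
  · rw [if_neg hai]
-- evolution of the visited matrix under bfs writes: a cell keeps its value or goes 0 → idx,
-- and a changed cell is in range with land = 1 there
def EvI (land : List (List Int)) (idx : Int) (V V' : List (List Int)) : Prop :=
  ∀ i j : Nat, g V' i j = g V i j ∨
    (g V i j = 0 ∧ g V' i j = idx ∧ i < land.length ∧ j < (land.headD []).length ∧
      g land i j = 1)

theorem evI_refl (land : List (List Int)) (idx : Int) (V : List (List Int)) :
    EvI land idx V V := fun i j => Or.inl rfl

theorem evI_trans {land : List (List Int)} {idx : Int} {V1 V2 V3 : List (List Int)}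
    (h1 : EvI land idx V1 V2) (h2 : EvI land idx V2 V3) : EvI land idx V1 V3 := by
  intro i j
  rcases h2 i j with h | h <;> rcases h1 i j with h' | h'
  · exact Or.inl (h.trans h')
  · exact Or.inr ⟨h'.1, h.trans h'.2.1, h'.2.2⟩
  · exact Or.inr ⟨h'.symm.trans h.1, h.2⟩
  · obtain ⟨a1, a2, -⟩ := h
    obtain ⟨b1, b2, -⟩ := h'
    exact Or.inl (by omega)

-- multi-call evolution (idx forgotten): values persist once nonzero, and only land = 1 cells change
def Ev (land : List (List Int)) (V V' : List (List Int)) : Prop :=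
  ∀ i j : Nat, g V' i j = g V i j ∨ (g V i j = 0 ∧ g land i j = 1)

theorem ev_of_evI {land : List (List Int)} {idx : Int} {V V' : List (List Int)}
    (h : EvI land idx V V') : Ev land V V' := by
  intro i j
  rcases h i j with h' | h'
  · exact Or.inl h'
  · exact Or.inr ⟨h'.1, h'.2.2.2.2⟩

theorem ev_refl (land V : List (List Int)) : Ev land V V := fun i j => Or.inl rfl

theorem ev_trans {land V1 V2 V3 : List (List Int)}
    (h1 : Ev land V1 V2) (h2 : Ev land V2 V3) : Ev land V1 V3 := by
  intro i j
  rcases h2 i j with h | h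
  · rcases h1 i j with h' | h'
    · exact Or.inl (h.trans h')
    · exact Or.inr h'
  · rcases h1 i j with h' | h'
    · exact Or.inr ⟨h'.symm.trans h.1, h.2⟩
    · exact Or.inr h'

theorem bfsStep_spec (land : List (List Int)) (x y idx : Int)
    (s : List (Int × Int) × List (List Int) × Int) (k : Int)
    (hS : Shaped land.length (land.headD []).length s.2.1) :
    EvI land idx s.2.1 (bfsStep land x y idx s k).2.1 ∧
      Shaped land.length (land.headD []).length (bfsStep land x y idx s k).2.1 := by
  dsimp only [bfsStep]
  split
  · next hrange =>
    split
    · next hcell =>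
      obtain ⟨hnx0, hnxr, hny0, hnyc⟩ := hrange
      obtain ⟨h0, h1⟩ := hcell
      set nx := x + dxL.getD k.toNat 0 with hnx
      set ny := y + dyL.getD k.toNat 0 with hny
      have hnxe : nx = (nx.toNat : Int) := by omega
      have hnye : ny = (ny.toNat : Int) := by omega
      have hxr : nx.toNat < land.length := by omega
      have hyc : ny.toNat < (land.headD []).length := by omega
      have hvset : vset s.2.1 nx ny idx =
          s.2.1.set nx.toNat ((s.2.1.getD nx.toNat []).set ny.toNat idx) := by
        rw [hnxe, hnye, vset_natCast]; simp only [Int.toNat_natCast]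
      have h0' : g s.2.1 nx.toNat ny.toNat = 0 := by
        rw [← vget_natCast, ← hnxe, ← hnye]; exact h0
      have h1' : g land nx.toNat ny.toNat = 1 := by
        rw [← vget_natCast, ← hnxe, ← hnye]; exact h1
      constructor
      · intro i j
        simp only [hvset]
        by_cases hij : nx.toNat = i ∧ ny.toNat = j
        · obtain ⟨rfl, rfl⟩ := hij
          refine Or.inr ⟨h0', ?_, hxr, hyc, h1'⟩
          rw [← hS.1] at hxr
          exact g_set_self ⟨rfl, hS.2⟩ (by rw [hS.1] at hxr ⊢; exact hxr) (by
            exact hyc) idx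
        · exact Or.inl (g_set_ne _ _ _ _ _ _ hij)
      · simp only [hvset]
        exact shaped_set hS _ _ _ hxr
    · exact ⟨evI_refl _ _ _, hS⟩
  · exact ⟨evI_refl _ _ _, hS⟩
theorem foldl_bfsStep_spec (land : List (List Int)) (x y idx : Int) (l : List Int)
    (s : List (Int × Int) × List (List Int) × Int)
    (hS : Shaped land.length (land.headD []).length s.2.1) :
    EvI land idx s.2.1 (l.foldl (bfsStep land x y idx) s).2.1 ∧
      Shaped land.length (land.headD []).length (l.foldl (bfsStep land x y idx) s).2.1 := by
  induction l generalizing s with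
  | nil => exact ⟨evI_refl _ _ _, hS⟩
  | cons k t ih =>
    obtain ⟨h1, h2⟩ := bfsStep_spec land x y idx s k hS
    obtain ⟨h3, h4⟩ := ih (bfsStep land x y idx s k) h2
    exact ⟨evI_trans h1 h3, h4⟩

theorem bfsLoop_spec (land : List (List Int)) (idx : Int) (fuel : Nat)
    (q : List (Int × Int)) (V : List (List Int)) (cnt : Int)
    (hS : Shaped land.length (land.headD []).length V) :
    EvI land idx V (bfsLoop land idx fuel q V cnt).1 ∧
      Shaped land.length (land.headD []).length (bfsLoop land idx fuel q V cnt).1 := by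
  induction fuel generalizing q V cnt with
  | zero => exact ⟨evI_refl _ _ _, hS⟩
  | succ f ih =>
    match q with
    | [] => exact ⟨evI_refl _ _ _, hS⟩
    | (x, y) :: qs =>
      obtain ⟨h1, h2⟩ := foldl_bfsStep_spec land x y idx (PySem.List.pyRange 0 4 1) (qs, V, cnt) hS
      obtain ⟨h3, h4⟩ := ih _ _ _ h2
      exact ⟨evI_trans h1 h3, h4⟩

-- bfs from an in-range start cell (land = 1, currently unvisited): the matrix evolves by
-- writing idx into 0 cells of land-1 squares, the start cell definitely becomes idx,
-- and the shape is preserved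
theorem bfs_spec (land V : List (List Int)) (idx : Int) (x y : Nat)
    (hS : Shaped land.length (land.headD []).length V)
    (hx : x < land.length) (hy : y < (land.headD []).length)
    (h1 : g land x y = 1) (h0 : g V x y = 0) :
    EvI land idx V (bfs ↑x ↑y land V idx).1 ∧
      Shaped land.length (land.headD []).length (bfs ↑x ↑y land V idx).1 ∧
      g (bfs ↑x ↑y land V idx).1 x y = idx := by
  unfold bfs
  have hvset : vset V ↑x ↑y idx = V.set x ((V.getD x []).set y idx) := vset_natCast V x y idx
  have hS' : Shaped land.length (land.headD []).length (vset V ↑x ↑y idx) := by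
    rw [hvset]; exact shaped_set hS _ _ _ hx
  have hstart : g (vset V ↑x ↑y idx) x y = idx := by
    rw [hvset]; exact g_set_self hS hx hy idx
  have hev0 : EvI land idx V (vset V ↑x ↑y idx) := by
    intro i j
    by_cases hij : x = i ∧ y = j
    · obtain ⟨rfl, rfl⟩ := hij
      exact Or.inr ⟨h0, hstart, hx, hy, h1⟩
    · rw [hvset]
      exact Or.inl (g_set_ne _ _ _ _ _ _ hij)
  obtain ⟨h2, h3⟩ := bfsLoop_spec land idx (land.length * (land.headD []).length + 2)
      [(↑x, ↑y)] (vset V ↑x ↑y idx) 1 hS'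
  refine ⟨evI_trans hev0 h2, h3, ?_⟩
  rcases h2 x y with h | h
  · rw [h, hstart]
  · exact h.2.1
-- invariant of B's labelling state: shape, at least the dummy size 0, and every nonzero
-- cell holds a label in [1, sizes.length) and sits on land = 1
def InvB (land : List (List Int)) (s : BLabel) : Prop :=
  Shaped land.length (land.headD []).length s.V ∧ 1 ≤ s.sizes.length ∧
    ∀ i j : Nat, g s.V i j = 0 ∨
      (1 ≤ g s.V i j ∧ g s.V i j < (s.sizes.length : Int) ∧ g land i j = 1)

theorem foldl_pyRange_range {β : Type} (n : Nat) (f : β → Int → β) (init : β) :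
    (PySem.List.pyRange 0 n 1).foldl f init =
      (List.range n).foldl (fun s (k : Nat) => f s ↑k) init := by
  induction n with
  | zero => rw [PySem.List.pyRange_one_eq_nil (by omega)]; rfl
  | succ m ih =>
    rw [show ((m + 1 : Nat) : Int) = (m : Int) + 1 by push_cast; ring,
      PySem.List.pyRange_one_succ_right (by omega), List.foldl_append, ih,
      List.range_succ, List.foldl_append]
    rfl

-- reference per-column accumulator: the distinct nonzero labels of column j among the first
-- n rows in order of first appearance, together with the sum of their sizes
def colStep (V : List (List Int)) (S : List Int) (j : Nat)
    (st : List Int × Int) (i : Nat) : List Int × Int :=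
  if g V i j = 0 ∨ g V i j ∈ st.1 then st
  else (st.1 ++ [g V i j], st.2 + S.getD (g V i j).toNat 0)

def colAcc (V : List (List Int)) (S : List Int) (j : Nat) (n : Nat) : List Int × Int :=
  (List.range n).foldl (colStep V S j) ([], 0)

theorem colAcc_succ (V : List (List Int)) (S : List Int) (j n : Nat) :
    colAcc V S j (n + 1) = colStep V S j (colAcc V S j n) n := by
  unfold colAcc
  rw [List.range_succ, List.foldl_append]
  rfl

theorem colAcc_mem (V : List (List Int)) (S : List Int) (j n : Nat) (l : Int)
    (hl : l ∈ (colAcc V S j n).1) : l ≠ 0 ∧ ∃ i, i < n ∧ g V i j = l := by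
  induction n with
  | zero => simp [colAcc] at hl
  | succ m ih =>
    rw [colAcc_succ] at hl
    unfold colStep at hl
    split at hl
    · obtain ⟨h1, i, h2, h3⟩ := ih hl
      exact ⟨h1, i, by omega, h3⟩
    · next hcond =>
      rw [not_or] at hcond
      rcases List.mem_append.1 hl with h | h
      · obtain ⟨h1, i, h2, h3⟩ := ih h
        exact ⟨h1, i, by omega, h3⟩
      · rw [List.mem_singleton] at h
        exact ⟨h ▸ hcond.1, m, by omega, h.symm⟩

-- the accumulator only depends on the column's values and on S below the labels that occur
theorem colAcc_congr (V V' : List (List Int)) (S ext : List Int) (j n : Nat)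
    (hvals : ∀ i, i < n → g V' i j = g V i j)
    (hbound : ∀ i, i < n → g V i j = 0 ∨
      (1 ≤ g V i j ∧ g V i j < (S.length : Int))) :
    colAcc V' (S ++ ext) j n = colAcc V S j n := by
  induction n with
  | zero => rfl
  | succ m ih =>
    have ihm := ih (fun i hi => hvals i (by omega)) (fun i hi => hbound i (by omega))
    rw [colAcc_succ, colAcc_succ, ihm]
    unfold colStep
    rw [hvals m (by omega)]
    rcases hbound m (by omega) with h | h
    · rw [if_pos (Or.inl h), if_pos (Or.inl h)]
    · split
      · rfl
      · rw [List.getD_append _ _ _ _ (by omega)]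
-- B's per-column value (set of labels, 0 discarded, sizes summed) IS the reference accumulator
theorem colTotal_eq_colAcc (rows : Nat) (V : List (List Int)) (S : List Int) (j : Nat) :
    colTotal rows V S ↑j = (colAcc V S j rows).2 := by
  unfold colTotal
  rw [foldl_pyRange_range]
  suffices h : ∀ n : Nat, ∀ (st : PySem.Set Int) (acc : List Int × Int),
      PySem.Set.discard st 0 = acc.1 →
      ((PySem.Set.discard st 0).map (fun l => S.getD l.toNat 0)).sum = acc.2 →
      PySem.Set.discard ((List.range n).foldl (fun s (k : Nat) =>
          PySem.Set.add s (vget V ↑k ↑j)) st) 0 =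
        ((List.range n).foldl (colStep V S j) acc).1 ∧
      ((PySem.Set.discard ((List.range n).foldl (fun s (k : Nat) =>
          PySem.Set.add s (vget V ↑k ↑j)) st) 0).map (fun l => S.getD l.toNat 0)).sum =
        ((List.range n).foldl (colStep V S j) acc).2 by
    exact (h rows PySem.Set.empty ([], 0) rfl rfl).2
  intro n
  induction n with
  | zero => intro st acc h1 h2; exact ⟨h1, h2⟩
  | succ m ih =>
    intro st acc h1 h2
    obtain ⟨ih1, ih2⟩ := ih st acc h1 h2
    rw [List.range_succ, List.foldl_append, List.foldl_append]
    simp only [List.foldl_cons, List.foldl_nil]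
    set st' := (List.range m).foldl (fun s (k : Nat) => PySem.Set.add s (vget V ↑k ↑j)) st
    set acc' := (List.range m).foldl (colStep V S j) acc
    rw [vget_natCast]
    unfold colStep
    by_cases h0 : g V m j = 0
    · rw [if_pos (Or.inl h0), h0]
      have hd : PySem.Set.discard (PySem.Set.add st' 0) 0 = PySem.Set.discard st' 0 := by
        unfold PySem.Set.add
        split
        · rfl
        · unfold PySem.Set.discard
          rw [List.filter_append]
          simp
      exact ⟨hd.trans ih1, by rw [hd]; exact ih2⟩
    · by_cases hmem : g V m j ∈ st'
      · have hacc : g V m j ∈ acc'.1 := by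
          rw [← ih1, PySem.Set.mem_discard]
          exact ⟨hmem, h0⟩
        rw [if_pos (Or.inr hacc), PySem.Set.add_of_mem hmem]
        exact ⟨ih1, ih2⟩
      · have hacc : g V m j ∉ acc'.1 := by
          rw [← ih1, PySem.Set.mem_discard]
          intro hk; exact hmem hk.1
        rw [if_neg (by rw [not_or]; exact ⟨h0, hacc⟩), PySem.Set.add_of_not_mem hmem]
        have hd : PySem.Set.discard (st' ++ [g V m j]) 0 =
            PySem.Set.discard st' 0 ++ [g V m j] := by
          unfold PySem.Set.discard
          rw [List.filter_append]
          simp [h0]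
        constructor
        · rw [hd, ih1]
        · rw [hd, List.map_append, List.sum_append, ih2]
          simp
-- one labelling step preserves the invariant, only extends sizes, and evolves the matrix
theorem bCell_spec (land : List (List Int)) (j i : Int) (s : BLabel)
    (hInv : InvB land s)
    (hi : 0 ≤ i ∧ i < (land.length : Int))
    (hj : 0 ≤ j ∧ j < ((land.headD []).length : Int)) :
    InvB land (bCell land j s i) ∧
      (∃ ext, (bCell land j s i).sizes = s.sizes ++ ext) ∧
      EvI land (s.sizes.length : Int) s.V (bCell land j s i).V := by
  obtain ⟨hS, hlen, hlab⟩ := hInv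
  unfold bCell
  split
  · next hcond =>
    obtain ⟨h1, h0⟩ := hcond
    have hie : i = ((i.toNat : Nat) : Int) := by omega
    have hje : j = ((j.toNat : Nat) : Int) := by omega
    have h1' : g land i.toNat j.toNat = 1 := by rw [← vget_natCast, ← hie, ← hje]; exact h1
    have h0' : g s.V i.toNat j.toNat = 0 := by rw [← vget_natCast, ← hie, ← hje]; exact h0
    have hx : i.toNat < land.length := by omega
    have hy : j.toNat < (land.headD []).length := by omega
    have hb := bfs_spec land s.V (s.sizes.length : Int) i.toNat j.toNat hS hx hy h1' h0'
    rw [← hie, ← hje] at hb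
    obtain ⟨hev, hS', -⟩ := hb
    refine ⟨⟨hS', by simp, ?_⟩, ⟨_, rfl⟩, hev⟩
    intro i' j'
    dsimp only
    simp only [List.length_append, List.length_cons, List.length_nil]
    rcases hev i' j' with h | h
    · rcases hlab i' j' with h' | h'
      · exact Or.inl (h.trans h')
      · obtain ⟨b1, b2, b3⟩ := h'
        exact Or.inr ⟨by omega, by omega, b3⟩
    · obtain ⟨b1, b2, b3, b4, b5⟩ := h
      exact Or.inr ⟨by omega, by omega, b5⟩
  · exact ⟨⟨hS, hlen, hlab⟩, ⟨[], by simp⟩, evI_refl _ _ _⟩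

-- folding labelling steps over any cells of one column
theorem foldl_bCell_spec (land : List (List Int)) (j : Int) (l : List Int) (s : BLabel)
    (hInv : InvB land s)
    (hl : ∀ i ∈ l, 0 ≤ i ∧ i < (land.length : Int))
    (hj : 0 ≤ j ∧ j < ((land.headD []).length : Int)) :
    InvB land (l.foldl (bCell land j) s) ∧
      (∃ ext, (l.foldl (bCell land j) s).sizes = s.sizes ++ ext) ∧
      Ev land s.V (l.foldl (bCell land j) s).V := by
  induction l generalizing s with
  | nil => exact ⟨hInv, ⟨[], by simp⟩, ev_refl _ _⟩
  | cons i t ih =>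
    obtain ⟨h1, ⟨e1, h2⟩, h3⟩ := bCell_spec land j i s hInv (hl i (by simp)) hj
    obtain ⟨h4, ⟨e2, h5⟩, h6⟩ := ih (bCell land j s i) h1 (fun i' hi' => hl i' (by simp [hi']))
    exact ⟨h4, ⟨e1 ++ e2, by rw [List.foldl_cons, h5, h2, List.append_assoc]⟩,
      ev_trans (ev_of_evI h3) h6⟩

theorem bCol_spec (land : List (List Int)) (rows : Nat) (hrows : rows = land.length)
    (j : Int) (s : BLabel) (hInv : InvB land s)
    (hj : 0 ≤ j ∧ j < ((land.headD []).length : Int)) :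
    InvB land (bCol land rows s j) ∧
      (∃ ext, (bCol land rows s j).sizes = s.sizes ++ ext) ∧
      Ev land s.V (bCol land rows s j).V := by
  unfold bCol
  refine foldl_bCell_spec land j _ s hInv ?_ hj
  intro i hi
  rw [PySem.List.mem_pyRange_one] at hi
  omega

-- folding whole columns (used to carry a column's value across the later columns)
theorem foldl_bCol_spec (land : List (List Int)) (rows : Nat) (hrows : rows = land.length)
    (js : List Int) (s : BLabel) (hInv : InvB land s)
    (hjs : ∀ j ∈ js, 0 ≤ j ∧ j < ((land.headD []).length : Int)) :
    InvB land (js.foldl (bCol land rows) s) ∧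
      (∃ ext, (js.foldl (bCol land rows) s).sizes = s.sizes ++ ext) ∧
      Ev land s.V (js.foldl (bCol land rows) s).V := by
  induction js generalizing s with
  | nil => exact ⟨hInv, ⟨[], by simp⟩, ev_refl _ _⟩
  | cons j t ih =>
    obtain ⟨h1, ⟨e1, h2⟩, h3⟩ := bCol_spec land rows hrows j s hInv (hjs j (by simp))
    obtain ⟨h4, ⟨e2, h5⟩, h6⟩ := ih (bCol land rows s j) h1 (fun j' hj' => hjs j' (by simp [hj']))
    exact ⟨h4, ⟨e1 ++ e2, by rw [List.foldl_cons, h5, h2, List.append_assoc]⟩,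
      ev_trans h3 h6⟩
-- A's dict always holds exactly the labels 1 .. idx-1, with B's sizes as values
theorem dic_keys_of_items (dic : PySem.Dict Int Int) (idx : Int) (S : List Int)
    (h : dic.items = (PySem.List.pyRange 1 idx 1).map (fun l => (l, S.getD l.toNat 0))) :
    dic.keys = PySem.List.pyRange 1 idx 1 := by
  simp only [PySem.Dict.keys, h, List.map_map]
  exact List.map_id _ ▸ rfl

theorem dic_get (dic : PySem.Dict Int Int) (idx : Int) (S : List Int)
    (h : dic.items = (PySem.List.pyRange 1 idx 1).map (fun l => (l, S.getD l.toNat 0)))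
    (l : Int) (hl1 : 1 ≤ l) (hl2 : l < idx) :
    dic.get? l = some (S.getD l.toNat 0) := by
  apply PySem.Dict.get?_of_mem_items
  · rw [h]
    exact List.mem_map.2 ⟨l, PySem.List.mem_pyRange_one.2 ⟨hl1, hl2⟩, rfl⟩
  · rw [dic_keys_of_items _ _ _ h]
    exact PySem.List.nodup_pyRange_one _ _

theorem dic_not_contains (dic : PySem.Dict Int Int) (idx : Int) (S : List Int)
    (h : dic.items = (PySem.List.pyRange 1 idx 1).map (fun l => (l, S.getD l.toNat 0))) :
    dic.contains idx = false := by
  simp only [PySem.Dict.contains, h]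
  rw [List.any_eq_false]
  intro p hp
  obtain ⟨l, hl, rfl⟩ := List.mem_map.1 hp
  rw [PySem.List.mem_pyRange_one] at hl
  simp only [beq_iff_eq]
  omega

theorem items_insert_fresh (d : PySem.Dict Int Int) (k v : Int)
    (hk : d.contains k = false) :
    (d.insert k v).items = d.items ++ [(k, v)] := by
  have h := PySem.Dict.items_foldl_insert_fresh (l := [()]) (k := fun _ => k)
    (v := fun _ => v) (d := d) (by intro a _; exact hk) (by simp)
  simpa using h
-- the heart of the proof: walking one column, A's running tmp / dic_tmp bookkeeping
-- computes exactly the reference accumulator (distinct nonzero labels, sizes summed),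
-- in lockstep with B's labelling fold
theorem inner_loop (land : List (List Int)) (jn : Nat)
    (hj : jn < (land.headD []).length)
    (idx0 : Int) (n : Nat) :
    ∀ (i0 : Nat), i0 + n = land.length →
    ∀ (a : AInner) (b : BLabel),
      a.V = b.V → a.idx = (b.sizes.length : Int) →
      a.dic.items = (PySem.List.pyRange 1 a.idx 1).map
        (fun l => (l, b.sizes.getD l.toNat 0)) →
      InvB land b →
      1 ≤ idx0 → idx0 ≤ a.idx →
      (∀ i', i' < i0 → g b.V i' jn ≠ 0 ∨ g land i' jn ≠ 1) →
      a.tmp = (colAcc b.V b.sizes jn i0).2 →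
      (∀ l : Int, l ∈ a.dicTmp ↔ (1 ≤ l ∧ l < idx0 ∧ l ∉ (colAcc b.V b.sizes jn i0).1)) →
      a.dicTmp.Nodup →
      (∀ l : Int, idx0 ≤ l → l < a.idx → l ∈ (colAcc b.V b.sizes jn i0).1) →
      ((PySem.List.pyRange ↑i0 ↑land.length 1).foldl (aRow land ↑jn) a).V =
        ((PySem.List.pyRange ↑i0 ↑land.length 1).foldl (bCell land ↑jn) b).V ∧
      ((PySem.List.pyRange ↑i0 ↑land.length 1).foldl (aRow land ↑jn) a).idx =
        ((((PySem.List.pyRange ↑i0 ↑land.length 1).foldl (bCell land ↑jn) b).sizes.length :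
          Nat) : Int) ∧
      ((PySem.List.pyRange ↑i0 ↑land.length 1).foldl (aRow land ↑jn) a).dic.items =
        (PySem.List.pyRange 1
            ((PySem.List.pyRange ↑i0 ↑land.length 1).foldl (aRow land ↑jn) a).idx 1).map
          (fun l => (l,
            ((PySem.List.pyRange ↑i0 ↑land.length 1).foldl (bCell land ↑jn) b).sizes.getD
              l.toNat 0)) ∧
      InvB land ((PySem.List.pyRange ↑i0 ↑land.length 1).foldl (bCell land ↑jn) b) ∧
      (∀ i', i' < land.length →
        g ((PySem.List.pyRange ↑i0 ↑land.length 1).foldl (bCell land ↑jn) b).V i' jn ≠ 0 ∨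
          g land i' jn ≠ 1) ∧
      ((PySem.List.pyRange ↑i0 ↑land.length 1).foldl (aRow land ↑jn) a).tmp =
        (colAcc ((PySem.List.pyRange ↑i0 ↑land.length 1).foldl (bCell land ↑jn) b).V
          ((PySem.List.pyRange ↑i0 ↑land.length 1).foldl (bCell land ↑jn) b).sizes jn
          land.length).2 := by
  induction n with
  | zero =>
    intro i0 hi0 a b hV hidx hitems hInv h01 h0idx hsat htmp hdt hnd hseen
    rw [PySem.List.pyRange_one_eq_nil (by omega)]
    simp only [List.foldl_nil]
    have hrows : i0 = land.length := by omega
    subst hrows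
    exact ⟨hV, hidx, hitems, hInv, fun i' hi' => hsat i' hi', htmp⟩
  | succ m ih =>
    intro i0 hi0 a b hV hidx hitems hInv h01 h0idx hsat htmp hdt hnd hseen
    have hi0r : i0 < land.length := by omega
    rw [PySem.List.pyRange_one_cons (by exact_mod_cast hi0r)]
    simp only [List.foldl_cons]
    rw [show ((i0 : Int) + 1) = ((i0 + 1 : Nat) : Int) by push_cast; ring]
    obtain ⟨hS, hlen1, hlab⟩ := hInv
    have hreadl : vget a.V ↑i0 ↑jn = g b.V i0 jn := by rw [hV, vget_natCast]
    have hInv' : InvB land b := ⟨hS, hlen1, hlab⟩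
    by_cases hland : g land i0 jn = 1
    · have hland' : vget land ↑i0 ↑jn = 1 := by rw [vget_natCast]; exact hland
      by_cases hzero : g b.V i0 jn = 0
      · -- new component: both sides launch the same bfs
        have ha1 : aRow land ↑jn a ↑i0 =
            { V := (bfs ↑i0 ↑jn land a.V a.idx).1,
              dic := a.dic.insert a.idx (bfs ↑i0 ↑jn land a.V a.idx).2,
              idx := a.idx + 1, tmp := a.tmp + (bfs ↑i0 ↑jn land a.V a.idx).2,
              dicTmp := a.dicTmp } := by
          unfold aRow
          rw [if_pos hland', if_pos (by rw [hreadl]; exact hzero)]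
        have hb1 : bCell land ↑jn b ↑i0 =
            { V := (bfs ↑i0 ↑jn land b.V (b.sizes.length : Int)).1,
              sizes := b.sizes ++ [(bfs ↑i0 ↑jn land b.V (b.sizes.length : Int)).2] } := by
          unfold bCell
          rw [if_pos ⟨hland', by rw [← hV, hreadl]; exact hzero⟩]
        set r := bfs ↑i0 ↑jn land b.V (b.sizes.length : Int) with hr
        have hsame : bfs ↑i0 ↑jn land a.V a.idx = r := by rw [hV, hidx]
        have hbspec := bfs_spec land b.V (b.sizes.length : Int) i0 jn hS hi0r hj hland
          hzero
        rw [← hr] at hbspec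
        obtain ⟨hev, hS', hstart⟩ := hbspec
        have hInvb1 : InvB land (bCell land ↑jn b ↑i0) :=
          (bCell_spec land ↑jn ↑i0 b hInv' ⟨by omega, by exact_mod_cast hi0r⟩
            ⟨by omega, by exact_mod_cast hj⟩).1
        rw [hb1] at hInvb1
        -- prefix of the column is unchanged by the bfs call
        have hvals : ∀ i', i' < i0 → g r.1 i' jn = g b.V i' jn := by
          intro i' hi'
          rcases hev i' jn with h | h
          · exact h
          · rcases hsat i' hi' with h' | h'
            · exact absurd h.1 h'
            · exact absurd h.2.2.2.2 h'
        have hbound : ∀ i', i' < i0 → g b.V i' jn = 0 ∨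
            (1 ≤ g b.V i' jn ∧ g b.V i' jn < (b.sizes.length : Int)) := by
          intro i' _
          rcases hlab i' jn with h | h
          · exact Or.inl h
          · exact Or.inr ⟨h.1, h.2.1⟩
        have hacc : colAcc r.1 (b.sizes ++ [r.2]) jn i0 = colAcc b.V b.sizes jn i0 := by
          exact colAcc_congr b.V r.1 b.sizes [r.2] jn i0 hvals hbound
        have hfresh : a.idx ∉ (colAcc b.V b.sizes jn i0).1 := by
          intro hmem
          obtain ⟨h1, i', h2, h3⟩ := colAcc_mem b.V b.sizes jn i0 a.idx hmem
          rcases hlab i' jn with h | h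
          · rw [h3] at h; omega
          · rw [h3] at h; omega
        have hstep : colAcc r.1 (b.sizes ++ [r.2]) jn (i0 + 1) =
            ((colAcc b.V b.sizes jn i0).1 ++ [a.idx], (colAcc b.V b.sizes jn i0).2 + r.2) := by
          rw [colAcc_succ, hacc]
          unfold colStep
          have hval0 : g r.1 i0 jn = a.idx := by rw [hstart, hidx]
          rw [if_neg (by
            rw [not_or, hval0]
            exact ⟨by omega, hfresh⟩)]
          rw [hval0, hidx]
          simp
        -- apply the induction hypothesis to the new states
        refine ih (i0 + 1) (by omega) (aRow land ↑jn a ↑i0) (bCell land ↑jn b ↑i0)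
          ?_ ?_ ?_ ?_ h01 ?_ ?_ ?_ ?_ ?_ ?_
        · rw [ha1, hb1, hsame]
        · rw [ha1, hb1, hsame]
          dsimp only
          simp only [List.length_append, List.length_cons, List.length_nil]
          push_cast
          omega
        · rw [ha1, hb1, hsame]
          dsimp only
          rw [items_insert_fresh _ _ _ (dic_not_contains _ _ _ hitems), hitems]
          rw [PySem.List.pyRange_one_succ_right (by omega), List.map_append]
          congr 1
          · apply List.map_congr_left
            intro x hx
            rw [PySem.List.mem_pyRange_one] at hx
            rw [List.getD_append _ _ _ _ (by rw [hidx] at hx; omega)]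
          · simp only [List.map_cons, List.map_nil]
            rw [List.getD_append_right _ _ _ _ (by rw [hidx]; simp)]
            rw [hidx]
            simp
        · rw [hb1]; exact hInvb1
        · rw [ha1]
          show idx0 ≤ a.idx + 1
          omega
        · intro i' hi'
          rw [hb1]
          dsimp only
          rcases Nat.lt_or_ge i' i0 with h | h
          · rw [hvals i' h]
            exact hsat i' h
          · have : i' = i0 := by omega
            subst this
            left
            rw [hstart]
            simp only [ne_eq]
            omega
        · rw [ha1, hb1]
          dsimp only
          rw [hstep, htmp, hsame]
        · intro x
          rw [ha1, hb1]
          dsimp only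
          rw [hstep]
          dsimp only
          rw [hdt x, List.mem_append, List.mem_singleton]
          constructor
          · rintro ⟨x1, x2, x3⟩
            exact ⟨x1, x2, by rw [not_or]; exact ⟨x3, by omega⟩⟩
          · rintro ⟨x1, x2, x3⟩
            rw [not_or] at x3
            exact ⟨x1, x2, x3.1⟩
        · rw [ha1]; exact hnd
        · intro x hx1 hx2
          rw [ha1] at hx2
          rw [hb1]
          dsimp only at hx2 ⊢
          rw [hstep]
          dsimp only
          rw [List.mem_append, List.mem_singleton]
          rcases (by omega : x < a.idx ∨ x = a.idx) with h | h
          · exact Or.inl (hseen x hx1 h)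
          · exact Or.inr h
      · -- already-labelled cell: B does nothing, A may credit the component at most once
        have hb1 : bCell land ↑jn b ↑i0 = b := by
          unfold bCell
          rw [if_neg (by
            rw [not_and_or]
            right
            rw [← hV, hreadl]
            exact hzero)]
        have hbnd : 1 ≤ g b.V i0 jn ∧ g b.V i0 jn < (b.sizes.length : Int) := by
          rcases hlab i0 jn with h | h
          · exact absurd h hzero
          · exact ⟨h.1, h.2.1⟩
        by_cases hmem : g b.V i0 jn ∈ a.dicTmp
        · -- first time this column meets an earlier component: credit its size
          have hx := (hdt _).1 hmem
          have ha1 : aRow land ↑jn a ↑i0 =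
              { a with tmp := a.tmp + (a.dic.get? (g b.V i0 jn)).getD 0,
                       dicTmp := (PySem.List.remove? a.dicTmp (g b.V i0 jn)).getD a.dicTmp } := by
            unfold aRow
            rw [if_pos hland', if_neg (by rw [hreadl]; exact hzero), if_pos (by
              rw [hreadl]
              exact List.contains_iff_mem.2 hmem)]
            rw [hreadl]
          have hget : (a.dic.get? (g b.V i0 jn)).getD 0 = b.sizes.getD (g b.V i0 jn).toNat 0 := by
            rw [dic_get a.dic a.idx b.sizes hitems _ hx.1 (by omega)]
            rfl
          have hrem : (PySem.List.remove? a.dicTmp (g b.V i0 jn)).getD a.dicTmp =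
              a.dicTmp.erase (g b.V i0 jn) := by
            rw [PySem.List.remove?_eq_some_erase a.dicTmp _ hmem]
            rfl
          have hstep : colAcc b.V b.sizes jn (i0 + 1) =
              ((colAcc b.V b.sizes jn i0).1 ++ [g b.V i0 jn],
               (colAcc b.V b.sizes jn i0).2 + b.sizes.getD (g b.V i0 jn).toNat 0) := by
            rw [colAcc_succ]
            unfold colStep
            rw [if_neg (by rw [not_or]; exact ⟨hzero, hx.2.2⟩)]
          rw [hb1]
          refine ih (i0 + 1) (by omega) (aRow land ↑jn a ↑i0) b
            ?_ ?_ ?_ ⟨hS, hlen1, hlab⟩ h01 ?_ ?_ ?_ ?_ ?_ ?_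
          · rw [ha1]; exact hV
          · rw [ha1]; exact hidx
          · rw [ha1]; exact hitems
          · rw [ha1]; exact h0idx
          · intro i' hi'
            rcases Nat.lt_or_ge i' i0 with h | h
            · exact hsat i' h
            · have : i' = i0 := by omega
              subst this
              exact Or.inl hzero
          · rw [ha1, hstep]
            dsimp only
            rw [htmp, hget]
          · intro x
            rw [ha1]
            dsimp only
            rw [hrem, hstep]
            dsimp only
            rw [List.Nodup.mem_erase_iff hnd, hdt x, List.mem_append, List.mem_singleton]
            constructor
            · rintro ⟨x0, x1, x2, x3⟩
              exact ⟨x1, x2, by rw [not_or]; exact ⟨x3, x0⟩⟩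
            · rintro ⟨x1, x2, x3⟩
              rw [not_or] at x3
              exact ⟨x3.2, x1, x2, x3.1⟩
          · rw [ha1]
            dsimp only
            rw [hrem]
            exact hnd.erase _
          · intro x hx1 hx2
            rw [ha1] at hx2
            rw [hstep]
            dsimp only at hx2 ⊢
            rw [List.mem_append]
            exact Or.inl (hseen x hx1 hx2)
        · -- the label was already credited (or was born this column): nothing happens
          have ha1 : aRow land ↑jn a ↑i0 = a := by
            unfold aRow
            rw [if_pos hland', if_neg (by rw [hreadl]; exact hzero), if_neg (by
              rw [hreadl]
              intro hc
              exact hmem (List.contains_iff_mem.1 hc))]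
          have hb1 : bCell land ↑jn b ↑i0 = b := hb1
          have hseen0 : g b.V i0 jn ∈ (colAcc b.V b.sizes jn i0).1 := by
            rcases Int.lt_or_le (g b.V i0 jn) idx0 with h | h
            · by_contra hc
              exact hmem ((hdt _).2 ⟨hbnd.1, h, hc⟩)
            · exact hseen _ h (by omega)
          have hstep : colAcc b.V b.sizes jn (i0 + 1) = colAcc b.V b.sizes jn i0 := by
            rw [colAcc_succ]
            unfold colStep
            rw [if_pos (Or.inr hseen0)]
          rw [ha1, hb1]
          refine ih (i0 + 1) (by omega) a b hV hidx hitems ⟨hS, hlen1, hlab⟩ h01 h0idx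
            ?_ ?_ ?_ hnd ?_
          · intro i' hi'
            rcases Nat.lt_or_ge i' i0 with h | h
            · exact hsat i' h
            · have : i' = i0 := by omega
              subst this
              exact Or.inl hzero
          · rw [hstep]; exact htmp
          · intro x
            rw [hstep]; exact hdt x
          · intro x hx1 hx2
            rw [hstep]; exact hseen x hx1 hx2
    · -- land ≠ 1 here: both sides skip, and the cell is 0 (nonzero cells sit on land = 1)
      have hcell0 : g b.V i0 jn = 0 := by
        rcases hlab i0 jn with h | h
        · exact h
        · exact absurd h.2.2 hland
      have ha1 : aRow land ↑jn a ↑i0 = a := by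
        unfold aRow
        rw [if_neg (by rw [vget_natCast]; exact hland)]
      have hb1 : bCell land ↑jn b ↑i0 = b := by
        unfold bCell
        rw [if_neg (by rw [not_and_or]; exact Or.inl (by rw [vget_natCast]; exact hland))]
      have hstep : colAcc b.V b.sizes jn (i0 + 1) = colAcc b.V b.sizes jn i0 := by
        rw [colAcc_succ]
        unfold colStep
        rw [if_pos (Or.inl hcell0)]
      rw [ha1, hb1]
      refine ih (i0 + 1) (by omega) a b hV hidx hitems ⟨hS, hlen1, hlab⟩ h01 h0idx
        ?_ ?_ ?_ hnd ?_
      · intro i' hi'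
        rcases Nat.lt_or_ge i' i0 with h | h
        · exact hsat i' h
        · have : i' = i0 := by omega
          subst this
          exact Or.inr hland
      · rw [hstep]; exact htmp
      · intro x
        rw [hstep]; exact hdt x
      · intro x hx1 hx2
        rw [hstep]; exact hseen x hx1 hx2
-- outer loop: the two ports walk the columns in lockstep; A's arr collects exactly
-- the per-column totals of the FINAL label matrix (later columns never disturb a
-- finished column, by saturation)
theorem outer_loop (land : List (List Int)) (m : Nat) :
    ∀ (j0 : Nat), j0 + m = (land.headD []).length →
    ∀ (a : AState) (b : BLabel),
      a.V = b.V → a.idx = (b.sizes.length : Int) →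
      a.dic.items = (PySem.List.pyRange 1 a.idx 1).map
        (fun l => (l, b.sizes.getD l.toNat 0)) →
      InvB land b →
      ((PySem.List.pyRange ↑j0 ↑(land.headD []).length 1).foldl
          (aCol land land.length) a).arr =
        a.arr ++ (PySem.List.pyRange ↑j0 ↑(land.headD []).length 1).map
          (fun j => colTotal land.length
            ((PySem.List.pyRange ↑j0 ↑(land.headD []).length 1).foldl
              (bCol land land.length) b).V
            ((PySem.List.pyRange ↑j0 ↑(land.headD []).length 1).foldl
              (bCol land land.length) b).sizes j) := by
  induction m with
  | zero =>
    intro j0 hj0 a b hV hidx hitems hInv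
    rw [PySem.List.pyRange_one_eq_nil (by omega)]
    simp
  | succ k ih =>
    intro j0 hj0 a b hV hidx hitems hInv
    have hj0c : j0 < (land.headD []).length := by omega
    rw [PySem.List.pyRange_one_cons (by exact_mod_cast hj0c)]
    simp only [List.foldl_cons]
    rw [show ((j0 : Int) + 1) = ((j0 + 1 : Nat) : Int) by push_cast; ring]
    obtain ⟨hS, hlen1, hlab⟩ := hInv
    -- run the inner lemma over column j0
    have hinner := inner_loop land j0 hj0c a.idx land.length 0 (by omega)
      { V := a.V, dic := a.dic, idx := a.idx, tmp := 0, dicTmp := a.dic.keys } b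
      hV hidx hitems ⟨hS, hlen1, hlab⟩ (by rw [hidx]; exact_mod_cast hlen1) le_rfl
      (fun i' hi' => absurd hi' (Nat.not_lt_zero i')) rfl
      (by
        intro l
        rw [dic_keys_of_items _ _ _ hitems, PySem.List.mem_pyRange_one]
        have hnil : (colAcc b.V b.sizes j0 0).1 = [] := rfl
        rw [hnil]
        simp)
      (by rw [dic_keys_of_items _ _ _ hitems]; exact PySem.List.nodup_pyRange_one _ _)
      (by
        intro l h1 h2
        dsimp only at h1 h2
        exact absurd h2 (by omega))
    rw [show ((0:Nat) : Int) = (0 : Int) from rfl] at hinner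
    obtain ⟨hV', hidx', hitems', hInv', hsat', htmp'⟩ := hinner
    set r := (PySem.List.pyRange 0 ↑land.length 1).foldl (aRow land ↑j0)
      { V := a.V, dic := a.dic, idx := a.idx, tmp := 0, dicTmp := a.dic.keys } with hr
    set b1 := (PySem.List.pyRange 0 ↑land.length 1).foldl (bCell land ↑j0) b with hb1
    have haCol : aCol land land.length a ↑j0 =
        { V := r.V, dic := r.dic, idx := r.idx, arr := a.arr ++ [r.tmp] } := rfl
    have hbCol : bCol land land.length b ↑j0 = b1 := rfl
    rw [haCol, hbCol]
    rw [ih (j0 + 1) (by omega) _ b1 hV' hidx' hitems' hInv']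
    dsimp only
    rw [List.map_cons, List.append_assoc, List.singleton_append]
    congr 2
    -- r.tmp is column j0's total of the FINAL matrix
    set bF := (PySem.List.pyRange ↑(j0 + 1) ↑(land.headD []).length 1).foldl
      (bCol land land.length) b1 with hbF
    obtain ⟨hInvF, ⟨ext, hext⟩, hev⟩ := foldl_bCol_spec land land.length rfl
      (PySem.List.pyRange ↑(j0 + 1) ↑(land.headD []).length 1) b1 hInv'
      (by
        intro j hjmem
        rw [PySem.List.mem_pyRange_one] at hjmem
        omega)
    rw [← hbF] at hInvF hext hev
    have hvals : ∀ i, i < land.length → g bF.V i j0 = g b1.V i j0 := by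
      intro i hi
      rcases hev i j0 with h | h
      · exact h
      · rcases hsat' i hi with h' | h'
        · exact absurd h.1 h'
        · exact absurd h.2 h'
    have hbound : ∀ i, i < land.length → g b1.V i j0 = 0 ∨
        (1 ≤ g b1.V i j0 ∧ g b1.V i j0 < (b1.sizes.length : Int)) := by
      intro i _
      rcases hInv'.2.2 i j0 with h | h
      · exact Or.inl h
      · exact Or.inr ⟨h.1, h.2.1⟩
    rw [htmp', colTotal_eq_colAcc, hext,
      colAcc_congr b1.V bF.V b1.sizes ext j0 land.length hvals hbound]


-- ===== VERDICT (by name: the statement is the Claim_ definition above) =====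
theorem solution_spec : Claim_equal_solution := by
  unfold Claim_equal_solution
  intro land _hDom hPre
  obtain ⟨hne, hcne, _hrows⟩ := hPre
  unfold Spec_solution solution solution_alt
  dsimp only
  have hinit : (1 : Int) = ((([0] : List Int).length : Nat) : Int) := by simp
  have hitems0 : (PySem.Dict.empty : PySem.Dict Int Int).items =
      (PySem.List.pyRange 1 1 1).map (fun l => (l, ([0] : List Int).getD l.toNat 0)) := by
    rw [PySem.List.pyRange_one_eq_nil le_rfl]
    rfl
  have hInv0 : InvB land
      { V := List.replicate land.length (List.replicate (land.headD []).length 0),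
        sizes := [0] } := by
    refine ⟨shaped_replicate _ _, by simp, ?_⟩
    intro i j
    exact Or.inl (g_replicate _ _ _ _)
  have harr := outer_loop land (land.headD []).length 0 (by omega)
    { V := List.replicate land.length (List.replicate (land.headD []).length 0),
      dic := PySem.Dict.empty, idx := 1, arr := [] }
    { V := List.replicate land.length (List.replicate (land.headD []).length 0),
      sizes := [0] }
    rfl hinit hitems0 hInv0
  simp only [Nat.cast_zero, List.nil_append] at harr
  rw [harr, PySem.List.foldl_append_singleton_eq_map, List.nil_append]
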